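-- pv_equiv track=rewrite | github.com/softkleenex/lgcpc-2025 | 2/solution_correct_v2.py | count_numbers_with_digit
-- ===== SOURCE A (Python) =====
-- MOD = 1000000007
--
-- def count_numbers_with_digit(n_str, pos, digit, k):
--     """pos 위치에 특정 digit이 오는 수의 개수 (tight 제약 고려)"""
--     n = len(n_str)
--
--     # 앞쪽 자릿수 경우의 수
--     front = 1
--     for i in range(pos):
--         if i == 0:
--             front = (front * (8 if k != 0 else 9)) % MOD  # 1~9에서 k 제외
--         else:
--             front = (front * 9) % MOD  # 0~9에서 k 제외
--
--     # 뒤쪽 자릿수 경우의 수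
--     back = 1
--     for i in range(pos + 1, n):
--         back = (back * 9) % MOD  # 0~9에서 k 제외
--
--     return (front * back) % MOD
-- ===== SOURCE B (Python) =====
-- MOD = 1000000007
--
-- def count_numbers_with_digit(n_str, pos, digit, k):
--     """pos 위치에 특정 digit이 오는 수의 개수 (tight 제약 고려)"""
--     n = len(n_str)
--     if pos > 0:
--         front = ((8 if k != 0 else 9) * pow(9, pos - 1, MOD)) % MOD
--     else:
--         front = 1
--     back = pow(9, max(0, n - pos - 1), MOD)
--     return (front * back) % MOD
-- ===== Notes on version B (the rewrite author's own statement) =====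
-- stated objective: faster
-- what changed: Replaced the two multiply-by-9 loops with a closed form using modular fast exponentiation pow(9, e, MOD).
import Mathlib
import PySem

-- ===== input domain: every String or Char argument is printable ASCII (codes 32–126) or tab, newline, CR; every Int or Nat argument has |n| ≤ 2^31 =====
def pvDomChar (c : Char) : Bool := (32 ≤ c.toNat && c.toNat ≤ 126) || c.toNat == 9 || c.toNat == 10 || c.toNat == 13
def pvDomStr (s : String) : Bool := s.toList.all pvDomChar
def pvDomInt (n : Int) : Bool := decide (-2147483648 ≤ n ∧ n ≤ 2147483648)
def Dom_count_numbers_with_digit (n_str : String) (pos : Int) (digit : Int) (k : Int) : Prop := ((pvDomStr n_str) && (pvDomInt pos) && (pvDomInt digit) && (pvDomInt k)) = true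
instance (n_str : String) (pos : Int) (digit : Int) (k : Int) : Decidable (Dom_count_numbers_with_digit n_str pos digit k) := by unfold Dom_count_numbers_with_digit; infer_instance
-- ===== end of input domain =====

-- B replaces A's two multiply-by-9 loops with a closed form evaluated by modular fast exponentiation.

def MOD : Int := 1000000007

-- ===== PORT A =====
def count_numbers_with_digit (n_str : String) (pos : Int) (digit : Int) (k : Int) : Int :=
  let n : Int := PySem.Str.len n_str
  -- front loop: for i in range(pos)
  let front : Int :=
    (PySem.List.pyRange 0 pos 1).foldl
      (fun front i =>
        if i = 0 then (front * (if k ≠ 0 then 8 else 9)) % MOD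
        else (front * 9) % MOD) 1
  -- back loop: for i in range(pos+1, n)
  let back : Int :=
    (PySem.List.pyRange (pos + 1) n 1).foldl (fun back _ => (back * 9) % MOD) 1
  (front * back) % MOD

-- ===== PORT B =====
-- pow(b, e, m) by binary exponentiation (all uses here have m > 0)
def powMod (b : Int) (e : Nat) (m : Int) : Int :=
  if h : e = 0 then 1 % m
  else
    let half := powMod b (e / 2) m
    if e % 2 = 0 then (half * half) % m
    else (((half * half) % m) * (b % m)) % m
termination_by e
decreasing_by exact Nat.div_lt_self (Nat.pos_of_ne_zero h) (by norm_num)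

def count_numbers_with_digit_alt (n_str : String) (pos : Int) (digit : Int) (k : Int) : Int :=
  let n : Int := PySem.Str.len n_str
  let front : Int :=
    if pos > 0 then ((if k ≠ 0 then 8 else 9) * powMod 9 (pos - 1).toNat MOD) % MOD
    else 1
  let back : Int := powMod 9 (max 0 (n - pos - 1)).toNat MOD
  (front * back) % MOD

-- ===== PRECONDITION & SPEC =====
def Spec_count_numbers_with_digit (n_str : String) (pos : Int) (digit : Int) (k : Int) (out : Int) : Prop := out = count_numbers_with_digit_alt n_str pos digit k
instance (n_str : String) (pos : Int) (digit : Int) (k : Int) (out : Int) : Decidable (Spec_count_numbers_with_digit n_str pos digit k out) := by unfold Spec_count_numbers_with_digit; infer_instance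

-- ===== CLAIM (what is proved, stated in full; the proofs are below) =====
def Claim_equal_count_numbers_with_digit : Prop := ∀ (n_str : String) (pos : Int) (digit : Int) (k : Int), Dom_count_numbers_with_digit n_str pos digit k → Spec_count_numbers_with_digit n_str pos digit k (count_numbers_with_digit n_str pos digit k)

-- ===== LEMMAS AND PROOFS =====

-- (c * (x % m)) % m = (c * x) % m
theorem mul_emod_right' (c x m : Int) : (c * (x % m)) % m = (c * x) % m := by
  rw [Int.mul_emod, Int.emod_emod_of_dvd x dvd_rfl, ← Int.mul_emod]

-- ((x % m) * (y % m) * z) % m = (x * y * z) % m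
theorem mulmod3 (x y z m : Int) : ((x % m) * (y % m) * z) % m = (x * y * z) % m := by
  calc ((x % m) * (y % m) * z) % m
      = (((x % m) * (y % m)) % m * (z % m)) % m := by rw [← Int.mul_emod]
    _ = ((x * y) % m * (z % m)) % m := by rw [← Int.mul_emod x y]
    _ = (x * y * z) % m := by rw [← Int.mul_emod]

-- powMod computes modular exponentiation
theorem powMod_eq (b m : Int) : ∀ e : Nat, powMod b e m = b ^ e % m := by
  intro e
  induction e using Nat.strong_induction_on with
  | _ e ih =>
    rw [powMod]
    by_cases h : e = 0
    · simp [h]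
    · simp only [h, dite_false]
      have hlt : e / 2 < e := Nat.div_lt_self (Nat.pos_of_ne_zero h) (by norm_num)
      rw [ih (e / 2) hlt]
      rcases Nat.mod_two_eq_zero_or_one e with h2 | h2
      · rw [if_pos h2, ← Int.mul_emod]
        have hbe : b ^ e = b ^ (e / 2) * b ^ (e / 2) := by
          rw [← pow_add]; congr 1; omega
        rw [hbe]
      · rw [if_neg (by omega), ← Int.mul_emod, mulmod3]
        have hbe : b ^ e = b ^ (e / 2) * b ^ (e / 2) * b := by
          rw [← pow_add, ← pow_succ]
          congr 1; omega
        rw [hbe]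

-- folding (·*9 % MOD) over a list starting from x % MOD
theorem fold9 (l : List Int) (x : Int) :
    l.foldl (fun b _ => (b * 9) % MOD) (x % MOD) = (x * 9 ^ l.length) % MOD := by
  induction l generalizing x with
  | nil => simp
  | cons a t ih =>
    simp only [List.foldl_cons, List.length_cons]
    have hstep : (x % MOD * 9) % MOD = (x * 9) % MOD := by
      rw [Int.mul_emod, Int.emod_emod_of_dvd x dvd_rfl, ← Int.mul_emod]
    rw [hstep, ih (x * 9)]
    congr 1
    ring

-- same fold with initial accumulator 1
theorem fold9_one (l : List Int) :
    l.foldl (fun b _ => (b * 9) % MOD) 1 = 9 ^ l.length % MOD := by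
  have h1 : (1 : Int) = 1 % MOD := by unfold MOD; decide
  rw [h1, fold9, one_mul]

-- on a range starting at a ≥ 1 the i = 0 branch never fires
theorem fold_front (c : Int) : ∀ (N : Nat) (a b acc : Int), (b - a).toNat = N → 1 ≤ a →
    (PySem.List.pyRange a b 1).foldl
      (fun f i => if i = 0 then (f * c) % MOD else (f * 9) % MOD) acc
    = (PySem.List.pyRange a b 1).foldl (fun f _ => (f * 9) % MOD) acc := by
  intro N
  induction N with
  | zero =>
    intro a b acc h h1
    rw [PySem.List.pyRange_one_eq_nil (by omega)]
    rfl
  | succ n ih =>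
    intro a b acc h h1
    rw [PySem.List.pyRange_one_cons (by omega : a < b)]
    simp only [List.foldl_cons]
    rw [if_neg (by omega : ¬ a = 0)]
    exact ih (a + 1) b _ (by omega) (by omega)

-- ===== VERDICT (by name: the statement is the Claim_ definition above) =====
theorem count_numbers_with_digit_spec : Claim_equal_count_numbers_with_digit := by
  intro n_str pos digit k _
  unfold Spec_count_numbers_with_digit
  simp only [count_numbers_with_digit, count_numbers_with_digit_alt, powMod_eq]
  have hexp : (max 0 (PySem.Str.len n_str - pos - 1)).toNat
      = (PySem.Str.len n_str - (pos + 1)).toNat := by omega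
  rw [hexp, fold9_one, PySem.List.length_pyRange_one]
  by_cases hp : pos > 0
  · rw [if_pos hp, PySem.List.pyRange_one_cons (show (0:Int) < pos from hp)]
    simp only [List.foldl_cons, zero_add]
    simp only [ite_true]
    rw [fold_front _ (pos - 1).toNat 1 pos _ rfl le_rfl]
    rw [show ((1 : Int) * (if k ≠ 0 then 8 else 9)) % MOD
        = (if k ≠ 0 then (8:Int) else 9) % MOD from by rw [one_mul]]
    rw [fold9, PySem.List.length_pyRange_one]
    conv_rhs => rw [mul_emod_right', mul_emod_right']
    conv_lhs => rw [mul_emod_right']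
  · rw [if_neg hp, PySem.List.pyRange_one_eq_nil (by omega : pos ≤ 0)]
    simp
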